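-- pv_equiv track=rewrite | github.com/beluxx/launchpad-sync | lib/lp/testing/utilities/retest.py | gen_test_lines
-- ===== SOURCE A (Python) =====
-- from itertools import takewhile
--
-- def gen_test_lines(lines):
--     def p_start(line):
--         return (
--             line.startswith('Tests with failures:') or
--             line.startswith('Tests with errors:'))
--
--     def p_take(line):
--         return not (
--             line.isspace() or
--             line.startswith('Total:'))
--
--     lines = iter(lines)
--     for line in lines:
--         if p_start(line):
--             for line in takewhile(p_take, lines):
--                 yield line
-- ===== SOURCE B (Python) =====
-- def gen_test_lines(lines):
--     def is_term(line):
--         return line.isspace() or line.startswith('Total:')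
--
--     def is_header(line):
--         return (line.startswith('Tests with failures:') or
--                 line.startswith('Tests with errors:'))
--
--     # stage 1: split the input into chunks at terminator lines (terminators dropped)
--     chunks = []
--     cur = []
--     for line in lines:
--         if is_term(line):
--             chunks.append(cur)
--             cur = []
--         else:
--             cur.append(line)
--     chunks.append(cur)
--     # stage 2: from each chunk, yield everything after its first header line
--     for chunk in chunks:
--         for i, line in enumerate(chunk):
--             if is_header(line):
--                 yield from chunk[i + 1:]
--                 break
-- ===== Notes on version B (the rewrite author's own statement) =====
-- stated objective: alternative
-- what changed: Replaced the streaming iterator-sharing takewhile loop with two staged passes: first split the lines into chunks at terminator lines, then for each chunk find its first header and yield the chunk's tail after it.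
import Mathlib
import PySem

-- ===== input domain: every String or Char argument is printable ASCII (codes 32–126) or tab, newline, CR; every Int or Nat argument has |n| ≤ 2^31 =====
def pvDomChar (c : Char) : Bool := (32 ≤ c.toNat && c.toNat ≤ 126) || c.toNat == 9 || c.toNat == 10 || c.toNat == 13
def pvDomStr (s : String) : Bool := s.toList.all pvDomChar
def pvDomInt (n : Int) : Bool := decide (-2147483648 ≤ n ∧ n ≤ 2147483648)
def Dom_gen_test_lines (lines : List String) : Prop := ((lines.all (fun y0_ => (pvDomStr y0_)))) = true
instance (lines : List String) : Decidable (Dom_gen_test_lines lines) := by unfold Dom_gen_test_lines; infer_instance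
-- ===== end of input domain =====

-- B replaces A's streaming takewhile loop over a shared iterator by two staged passes:
-- split at terminator lines into chunks, then emit each chunk's tail after its first header.

-- ===== PORT A =====
-- A's helper predicates, transliterated
def pA_start (line : String) : Bool :=
  PySem.Str.startswith line "Tests with failures:" || PySem.Str.startswith line "Tests with errors:"

def pA_take (line : String) : Bool :=
  !(PySem.Str.strIsspace line || PySem.Str.startswith line "Total:")

-- A's outer for-loop over the shared iterator, and the inner takewhile loop that
-- consumes from the SAME iterator and falls back to the outer loop when p_take fails.
mutual
  def gtOuter : List String → List String
    | [] => []
    | line :: rest => if pA_start line then gtInner rest else gtOuter rest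
  def gtInner : List String → List String
    | [] => []
    | line :: rest => if pA_take line then line :: gtInner rest else gtOuter rest
end

def gen_test_lines (lines : List String) : List String := gtOuter lines

-- ===== PORT B =====
def bIsTerm (line : String) : Bool :=
  PySem.Str.strIsspace line || PySem.Str.startswith line "Total:"

def bIsHeader (line : String) : Bool :=
  PySem.Str.startswith line "Tests with failures:" || PySem.Str.startswith line "Tests with errors:"

-- stage 1 of Source B: the splitting loop, state = (chunks, cur)
def bSplitStep (s : List (List String) × List String) (line : String) :
    List (List String) × List String :=
  if bIsTerm line then (s.1 ++ [s.2], []) else (s.1, s.2 ++ [line])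

-- stage 2 of Source B: scan a chunk for its first header, yield the tail after it
def bEmit : List String → List String
  | [] => []
  | line :: rest => if bIsHeader line then rest else bEmit rest

def gen_test_lines_alt (lines : List String) : List String :=
  let r := lines.foldl bSplitStep ([], [])
  (r.1 ++ [r.2]).flatMap bEmit

-- ===== PRECONDITION & SPEC =====
def Spec_gen_test_lines (lines : List String) (out : List String) : Prop := out = gen_test_lines_alt lines
instance (lines : List String) (out : List String) : Decidable (Spec_gen_test_lines lines out) := by unfold Spec_gen_test_lines; infer_instance

-- ===== CLAIM (what is proved, stated in full; the proofs are below) =====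
def Claim_equal_gen_test_lines : Prop := ∀ (lines : List String), Dom_gen_test_lines lines → Spec_gen_test_lines lines (gen_test_lines lines)

-- ===== LEMMAS AND PROOFS =====
-- recursive characterisation of the split: (first chunk, remaining chunks)
def splitR : List String → List String × List (List String)
  | [] => ([], [])
  | l :: rest =>
    let r := splitR rest
    if bIsTerm l then ([], r.1 :: r.2) else (l :: r.1, r.2)

theorem foldl_splitStep (ls : List String) (chs : List (List String)) (cur : List String) :
    (List.foldl bSplitStep (chs, cur) ls).1 ++ [(List.foldl bSplitStep (chs, cur) ls).2]
      = chs ++ (cur ++ (splitR ls).1) :: (splitR ls).2 := by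
  induction ls generalizing chs cur with
  | nil => simp [splitR]
  | cons l rest ih =>
    simp only [List.foldl_cons, bSplitStep, splitR]
    by_cases h : bIsTerm l = true <;> simp [h, ih]

-- p_start = bIsHeader, and p_take l = !(bIsTerm l), definitionally
theorem pA_take_eq (l : String) : pA_take l = !(bIsTerm l) := rfl

-- A's two loops, expressed through the split
theorem gt_eq_split (ls : List String) :
    gtOuter ls = bEmit (splitR ls).1 ++ (splitR ls).2.flatMap bEmit ∧
    gtInner ls = (splitR ls).1 ++ (splitR ls).2.flatMap bEmit := by
  induction ls with
  | nil => simp [gtOuter, gtInner, splitR, bEmit]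
  | cons l rest ih =>
    have hterm : bIsTerm l = true → pA_start l = false := by
      intro h
      cases hs : pA_start l with
      | false => rfl
      | true =>
        exfalso
        unfold pA_start at hs
        unfold bIsTerm at h
        have hpre : "Tests with failures:".toList <+: l.toList ∨
            "Tests with errors:".toList <+: l.toList := by
          rcases (Bool.or_eq_true _ _).mp hs with h' | h' <;>
            [left; right] <;>
            simpa [PySem.Str.startswith_eq, PySem.Chars.startswith_iff] using h'
        rcases (Bool.or_eq_true _ _).mp h with h' | h'
        · simp only [PySem.Str.strIsspace_eq] at h'
          rcases hpre with ⟨t, ht⟩ | ⟨t, ht⟩ <;> rw [← ht] at h' <;>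
            simp [PySem.Chars.strIsspace, PySem.Chars.isspace] at h'
        · simp only [PySem.Str.startswith_eq, PySem.Chars.startswith_iff] at h'
          obtain ⟨u, hu⟩ := h'
          rcases hpre with ⟨t, ht⟩ | ⟨t, ht⟩ <;> rw [← ht] at hu <;> simp at hu
    constructor
    · rw [gtOuter]
      by_cases ht : bIsTerm l = true
      · simp [ht, hterm ht, splitR, ih.1, bEmit]
      · simp only [splitR, ht, if_neg, Bool.not_eq_true] at *
        by_cases hs : pA_start l = true <;>
          simp [hs, bEmit, (show bIsHeader l = pA_start l from rfl), ih.1, ih.2]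
    · rw [gtInner, pA_take_eq]
      by_cases ht : bIsTerm l = true <;>
        simp [ht, splitR, ih.1, ih.2]

-- ===== VERDICT (by name: the statement is the Claim_ definition above) =====
theorem gen_test_lines_spec : Claim_equal_gen_test_lines := by
  intro lines _
  unfold Spec_gen_test_lines gen_test_lines gen_test_lines_alt
  rw [(gt_eq_split lines).1]
  have h := foldl_splitStep lines [] []
  simp only [List.nil_append] at h
  simp [h]
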